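-- pv_equiv track=rewrite | github.com/shinyaoguri/metaphor | scripts/generate-llms-txt.py | discover_module_order
-- ===== SOURCE A (Python) =====
-- def discover_module_order(modules: dict, main_module: str = "MetaphorCore",
--                           umbrella_module: str = "metaphor") -> list[str]:
--     """Determine module display order dynamically.
--
--     Rules:
--       1. main_module first (if present)
--       2. umbrella_module second (if present and different from main)
--       3. remaining modules in alphabetical order
--     """
--     names = set(modules.keys())
--     order: list[str] = []
--     for preferred in (main_module, umbrella_module):
--         if preferred in names:
--             order.append(preferred)
--             names.discard(preferred)
--     order.extend(sorted(names))
--     return order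
-- ===== SOURCE B (Python) =====
-- def discover_module_order(modules: dict, main_module: str = "MetaphorCore",
--                           umbrella_module: str = "metaphor") -> list[str]:
--     """Single keyed sort: rank main_module 0, umbrella_module 1, others 2,
--     tie-broken alphabetically."""
--     return sorted(
--         modules,
--         key=lambda m: (0 if m == main_module else (1 if m == umbrella_module else 2), m),
--     )
-- ===== Notes on version B (the rewrite author's own statement) =====
-- stated objective: idiomatic
-- what changed: Replaced the preferred-prefix loop with set bookkeeping plus a sort of the remainder by a single sort of all module names under a priority key (rank, name).
import Mathlib
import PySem

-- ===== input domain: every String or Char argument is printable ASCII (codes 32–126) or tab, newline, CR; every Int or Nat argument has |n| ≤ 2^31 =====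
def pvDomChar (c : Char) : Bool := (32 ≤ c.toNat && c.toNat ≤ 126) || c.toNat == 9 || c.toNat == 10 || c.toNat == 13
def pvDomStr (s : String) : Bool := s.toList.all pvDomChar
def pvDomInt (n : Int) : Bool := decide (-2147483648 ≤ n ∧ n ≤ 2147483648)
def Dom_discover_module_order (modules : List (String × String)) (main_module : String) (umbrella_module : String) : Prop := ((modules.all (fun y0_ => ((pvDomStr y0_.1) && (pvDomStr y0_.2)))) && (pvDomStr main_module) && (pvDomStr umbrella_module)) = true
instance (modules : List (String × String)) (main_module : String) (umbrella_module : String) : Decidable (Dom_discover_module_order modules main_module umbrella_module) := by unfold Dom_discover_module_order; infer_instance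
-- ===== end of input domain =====

-- B replaces A's preferred-prefix loop + sorted remainder with one sort of all module
-- names under a priority key (objective: idiomatic; same cost).

-- ===== PORT A =====
def discover_module_order (modules : List (String × String)) (main_module : String) (umbrella_module : String) : List String :=
  -- names = set(modules.keys()); the dict's keys are the distinct first-occurrence keys
  let names := PySem.Set.ofList (modules.map (fun p => p.1))
  let st :=
    [main_module, umbrella_module].foldl
      (fun (acc : List String × PySem.Set String) preferred =>
        if PySem.Set.contains acc.2 preferred then
          (acc.1 ++ [preferred], PySem.Set.discard acc.2 preferred)
        else acc)
      ([], names)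
  st.1 ++ PySem.List.sorted st.2 (fun x => x) false

-- ===== PORT B =====
def discover_module_order_alt (modules : List (String × String)) (main_module : String) (umbrella_module : String) : List String :=
  PySem.List.sorted2 (PySem.Set.ofList (modules.map (fun p => p.1)))
    (fun m => (if m == main_module then (0 : Int) else if m == umbrella_module then 1 else 2))
    (fun m => m) false

-- ===== PRECONDITION & SPEC =====
def Spec_discover_module_order (modules : List (String × String)) (main_module : String) (umbrella_module : String) (out : List String) : Prop := out = discover_module_order_alt modules main_module umbrella_module
instance (modules : List (String × String)) (main_module : String) (umbrella_module : String) (out : List String) : Decidable (Spec_discover_module_order modules main_module umbrella_module out) := by unfold Spec_discover_module_order; infer_instance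

-- ===== CLAIM (what is proved, stated in full; the proofs are below) =====
def Claim_equal_discover_module_order : Prop := ∀ (modules : List (String × String)) (main_module : String) (umbrella_module : String), Dom_discover_module_order modules main_module umbrella_module → Spec_discover_module_order modules main_module umbrella_module (discover_module_order modules main_module umbrella_module)

-- ===== LEMMAS AND PROOFS =====

-- B's priority key, as a lexicographic pair
def pvKey (mm um m : String) : Int ×ₗ String :=
  toLex ((if m == mm then (0 : Int) else if m == um then 1 else 2), m)

lemma pv_sorted2_eq_sorted_lex {α : Type} (xs : List α) (k1 : α → Int) (k2 : α → String) :
    PySem.List.sorted2 xs k1 k2 false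
      = PySem.List.sorted xs (fun x => toLex (k1 x, k2 x)) false := by
  have hf : (fun a b => decide (k1 a < k1 b) || (!decide (k1 b < k1 a) && decide (k2 a < k2 b)))
      = (fun a b => decide ((toLex (k1 a, k2 a) : Int ×ₗ String) < toLex (k1 b, k2 b))) := by
    funext a b
    by_cases h1 : k1 a < k1 b <;> by_cases h2 : k1 b < k1 a <;> by_cases h3 : k2 a < k2 b <;>
      simp [h1, h2, h3, Prod.Lex.lt_iff] <;> omega
  show List.foldl (fun acc x => PySem.List.insertBy
      (fun a b => decide (k1 a < k1 b) || (!decide (k1 b < k1 a) && decide (k2 a < k2 b))) x acc) [] xs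
    = List.foldl (fun acc x => PySem.List.insertBy
      (fun a b => decide ((toLex (k1 a, k2 a) : Int ×ₗ String) < toLex (k1 b, k2 b))) x acc) [] xs
  rw [hf]

lemma pv_alt_eq_sorted (modules : List (String × String)) (mm um : String) :
    discover_module_order_alt modules mm um
      = PySem.List.sorted (PySem.Set.ofList (modules.map (fun p => p.1))) (pvKey mm um) false := by
  unfold discover_module_order_alt
  exact pv_sorted2_eq_sorted_lex _ _ _

lemma pv_contains_iff (s : List String) (x : String) :
    PySem.Set.contains s x = true ↔ x ∈ s := by
  simp [PySem.Set.contains]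

lemma pv_discard_eq_erase (s : List String) (h : s.Nodup) (x : String) :
    PySem.Set.discard s x = s.erase x := by
  induction s with
  | nil => rfl
  | cons a t ih =>
    rcases List.nodup_cons.mp h with ⟨ha, ht⟩
    by_cases hax : a = x
    · subst hax
      simp only [PySem.Set.discard, List.erase_cons_head, List.filter_cons,
        BEq.rfl, Bool.not_true]
      exact List.filter_eq_self.mpr (fun y hy => by
        have hya : y ≠ a := fun e => ha (e ▸ hy)
        simp [hya])
    · have := ih ht
      simp only [PySem.Set.discard, List.filter_cons] at this ⊢
      simp [hax, this]

-- sorted of a duplicate-free string list is strictly increasing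
lemma pv_sorted_strict (t : List String) (h : t.Nodup) :
    (PySem.List.sorted t (fun x => x) false).Pairwise (· < ·) := by
  have hle := PySem.List.sorted_pairwise t (fun x => x)
  have hnd : (PySem.List.sorted t (fun x => x) false).Nodup :=
    ((PySem.List.sorted_perm t (fun x => x) false).nodup_iff).mpr h
  exact (hle.and hnd).imp (fun hp => lt_of_le_of_ne hp.1 hp.2)

-- strings of rank 2 compare under pvKey exactly as strings
lemma pv_pairwise_key_rank2 (mm um : String) (l : List String)
    (h : l.Pairwise (· < ·)) (h2 : ∀ y ∈ l, y ≠ mm ∧ y ≠ um) :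
    l.Pairwise (fun a b => pvKey mm um a < pvKey mm um b) := by
  refine h.imp_of_mem (fun {a b} ha hb hab => ?_)
  have ha2 := h2 a ha; have hb2 := h2 b hb
  simp [pvKey, ha2.1, ha2.2, hb2.1, hb2.2, Prod.Lex.lt_iff, hab]

lemma pv_rank_mm (mm um : String) :
    (if mm == mm then (0:Int) else if mm == um then 1 else 2) = 0 := by simp

lemma pv_rank_um (mm um : String) (h : um ≠ mm) :
    (if um == mm then (0:Int) else if um == um then 1 else 2) = 1 := by simp [h]

lemma pv_rank_other (mm um b : String) (h1 : b ≠ mm) (h2 : b ≠ um) :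
    (if b == mm then (0:Int) else if b == um then 1 else 2) = 2 := by simp [h1, h2]

lemma pv_key_lt_of_rank_lt (mm um a b : String)
    (ha : (if a == mm then (0:Int) else if a == um then 1 else 2)
        < (if b == mm then (0:Int) else if b == um then 1 else 2)) :
    pvKey mm um a < pvKey mm um b := by
  simp only [pvKey, Prod.Lex.lt_iff]
  exact Or.inl ha

-- ===== VERDICT (by name: the statement is the Claim_ definition above) =====
theorem discover_module_order_spec : Claim_equal_discover_module_order := by
  intro modules mm um _
  show discover_module_order modules mm um = discover_module_order_alt modules mm um
  rw [pv_alt_eq_sorted]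
  set ks := PySem.Set.ofList (modules.map (fun p => p.1)) with hks
  have hnd : List.Nodup ks := PySem.Set.nodup_ofList _
  simp only [discover_module_order, List.foldl, ← hks]
  by_cases h1 : mm ∈ ks
  · rw [if_pos ((pv_contains_iff _ _).mpr h1), pv_discard_eq_erase ks hnd mm]
    have hnd1 : (ks.erase mm).Nodup := hnd.erase mm
    by_cases h2 : um ∈ ks.erase mm
    · rw [if_pos ((pv_contains_iff _ _).mpr h2), pv_discard_eq_erase _ hnd1 um]
      have hum : um ≠ mm ∧ um ∈ ks := (List.Nodup.mem_erase_iff hnd).mp h2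
      have hnd2 : ((ks.erase mm).erase um).Nodup := hnd1.erase um
      have hmemt : ∀ y ∈ (ks.erase mm).erase um, y ≠ um ∧ y ≠ mm ∧ y ∈ ks := by
        intro y hy
        have h' := (List.Nodup.mem_erase_iff hnd1).mp hy
        have h'' := (List.Nodup.mem_erase_iff hnd).mp h'.2
        exact ⟨h'.1, h''.1, h''.2⟩
      refine (PySem.List.sorted_eq_of_perm_of_pairwise_lt ks
        (([] ++ [mm] ++ [um]) ++ PySem.List.sorted ((ks.erase mm).erase um) (fun x => x) false)
        (pvKey mm um) ?_ ?_).symm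
      · have p0 := PySem.List.sorted_perm ((ks.erase mm).erase um) (fun x => x) false
        have p1 : ks.Perm (mm :: ks.erase mm) := List.perm_cons_erase h1
        have p2 : (ks.erase mm).Perm (um :: (ks.erase mm).erase um) := List.perm_cons_erase h2
        simp only [List.nil_append, List.cons_append]
        exact ((p0.cons um).cons mm).trans ((p2.symm.cons mm).trans p1.symm)
      · simp only [List.nil_append, List.cons_append]
        refine List.Pairwise.cons ?_ (List.Pairwise.cons ?_ ?_)
        · intro b hb
          rcases List.mem_cons.mp hb with hbu | hb
          · subst hbu
            exact pv_key_lt_of_rank_lt mm b mm b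
              (by rw [pv_rank_mm, pv_rank_um mm b hum.1]; omega)
          · have hy := hmemt b ((PySem.List.mem_sorted _ _ _ _).mp hb)
            exact pv_key_lt_of_rank_lt mm um mm b
              (by rw [pv_rank_mm, pv_rank_other mm um b hy.2.1 hy.1]; omega)
        · intro b hb
          have hy := hmemt b ((PySem.List.mem_sorted _ _ _ _).mp hb)
          exact pv_key_lt_of_rank_lt mm um um b
            (by rw [pv_rank_um mm um hum.1, pv_rank_other mm um b hy.2.1 hy.1]; omega)
        · exact pv_pairwise_key_rank2 mm um _ (pv_sorted_strict _ hnd2)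
            (fun y hy => by
              have := hmemt y ((PySem.List.mem_sorted _ _ _ _).mp hy)
              exact ⟨this.2.1, this.1⟩)
    · rw [if_neg (fun hc => h2 ((pv_contains_iff _ _).mp hc))]
      have hmemt : ∀ y ∈ ks.erase mm, y ≠ mm ∧ y ≠ um := by
        intro y hy
        have h' := (List.Nodup.mem_erase_iff hnd).mp hy
        exact ⟨h'.1, fun hyu => h2 (hyu ▸ hy)⟩
      refine (PySem.List.sorted_eq_of_perm_of_pairwise_lt ks
        (([] ++ [mm]) ++ PySem.List.sorted (ks.erase mm) (fun x => x) false)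
        (pvKey mm um) ?_ ?_).symm
      · have p0 := PySem.List.sorted_perm (ks.erase mm) (fun x => x) false
        have p1 : ks.Perm (mm :: ks.erase mm) := List.perm_cons_erase h1
        simp only [List.nil_append, List.singleton_append]
        exact (p0.cons mm).trans p1.symm
      · simp only [List.nil_append, List.singleton_append]
        refine List.Pairwise.cons ?_ ?_
        · intro b hb
          have hy := hmemt b ((PySem.List.mem_sorted _ _ _ _).mp hb)
          exact pv_key_lt_of_rank_lt mm um mm b
            (by rw [pv_rank_mm, pv_rank_other mm um b hy.1 hy.2]; omega)
        · exact pv_pairwise_key_rank2 mm um _ (pv_sorted_strict _ (hnd.erase mm))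
            (fun y hy => hmemt y ((PySem.List.mem_sorted _ _ _ _).mp hy))
  · rw [if_neg (fun hc => h1 ((pv_contains_iff _ _).mp hc))]
    by_cases h2 : um ∈ ks
    · rw [if_pos ((pv_contains_iff _ _).mpr h2), pv_discard_eq_erase ks hnd um]
      have hmemt : ∀ y ∈ ks.erase um, y ≠ mm ∧ y ≠ um := by
        intro y hy
        have h' := (List.Nodup.mem_erase_iff hnd).mp hy
        exact ⟨fun hym => h1 (hym ▸ h'.2), h'.1⟩
      refine (PySem.List.sorted_eq_of_perm_of_pairwise_lt ks
        (([] ++ [um]) ++ PySem.List.sorted (ks.erase um) (fun x => x) false)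
        (pvKey mm um) ?_ ?_).symm
      · have p0 := PySem.List.sorted_perm (ks.erase um) (fun x => x) false
        have p1 : ks.Perm (um :: ks.erase um) := List.perm_cons_erase h2
        simp only [List.nil_append, List.singleton_append]
        exact (p0.cons um).trans p1.symm
      · simp only [List.nil_append, List.singleton_append]
        refine List.Pairwise.cons ?_ ?_
        · intro b hb
          have hy := hmemt b ((PySem.List.mem_sorted _ _ _ _).mp hb)
          have hum : um ≠ mm := fun h => h1 (h ▸ h2)
          exact pv_key_lt_of_rank_lt mm um um b
            (by rw [pv_rank_um mm um hum, pv_rank_other mm um b hy.1 hy.2]; omega)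
        · exact pv_pairwise_key_rank2 mm um _ (pv_sorted_strict _ (hnd.erase um))
            (fun y hy => hmemt y ((PySem.List.mem_sorted _ _ _ _).mp hy))
    · rw [if_neg (fun hc => h2 ((pv_contains_iff _ _).mp hc))]
      have hmemt : ∀ y ∈ ks, y ≠ mm ∧ y ≠ um := by
        intro y hy
        exact ⟨fun h => h1 (h ▸ hy), fun h => h2 (h ▸ hy)⟩
      refine (PySem.List.sorted_eq_of_perm_of_pairwise_lt ks
        ([] ++ PySem.List.sorted ks (fun x => x) false)
        (pvKey mm um) ?_ ?_).symm
      · simpa using PySem.List.sorted_perm ks (fun x => x) false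
      · simp only [List.nil_append]
        exact pv_pairwise_key_rank2 mm um _ (pv_sorted_strict _ hnd)
          (fun y hy => hmemt y ((PySem.List.mem_sorted _ _ _ _).mp hy))
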